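-- pv_equiv track=rewrite | github.com/nooshindev/my-python-project | library/mymethods/mylabrary.py | my_isupper
-- ===== SOURCE A (Python) =====
-- def my_isupper(s: str) -> bool:
--     has_upper = False
--     for ch in s:
--         if 'a' <= ch <= 'z':
--             return False
--         if 'A' <= ch <= 'Z':
--             has_upper = True
--     return has_upper
-- ===== SOURCE B (Python) =====
-- def my_isupper(s: str) -> bool:
--     has_upper = any('A' <= c <= 'Z' for c in s)
--     has_lower = any('a' <= c <= 'z' for c in s)
--     return has_upper and not has_lower
-- ===== Notes on version B (the rewrite author's own statement) =====
-- stated objective: idiomatic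
-- what changed: Replaced A's single early-exit scan with a mutable flag by two independent any() passes (has_upper and not has_lower).
import Mathlib
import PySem

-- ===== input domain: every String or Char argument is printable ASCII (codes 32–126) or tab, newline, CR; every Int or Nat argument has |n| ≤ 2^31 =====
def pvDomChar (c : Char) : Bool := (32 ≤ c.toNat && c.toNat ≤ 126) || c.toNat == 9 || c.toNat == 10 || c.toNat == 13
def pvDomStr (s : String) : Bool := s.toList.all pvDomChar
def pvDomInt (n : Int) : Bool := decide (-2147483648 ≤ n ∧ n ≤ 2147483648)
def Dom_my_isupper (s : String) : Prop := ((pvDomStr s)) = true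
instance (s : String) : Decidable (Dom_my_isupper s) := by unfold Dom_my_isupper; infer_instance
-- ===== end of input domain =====

-- B replaces A's single early-exit scan with a flag by two independent any-passes (idiomatic decomposition).


-- ===== PORT A =====
-- A's for-loop with early return and a mutable flag, as structural recursion over the characters.
def myIsupperLoopA : List Char → Bool → Bool
  | [], has_upper => has_upper
  | ch :: rest, has_upper =>
      if 'a' ≤ ch ∧ ch ≤ 'z' then false
      else myIsupperLoopA rest (if 'A' ≤ ch ∧ ch ≤ 'Z' then true else has_upper)

def my_isupper (s : String) : Bool := myIsupperLoopA s.toList false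

-- ===== PORT B =====
-- two independent any-passes, then 'has_upper and not has_lower'
def my_isupper_alt (s : String) : Bool :=
  let has_upper := s.toList.any (fun c => decide ('A' ≤ c ∧ c ≤ 'Z'))
  let has_lower := s.toList.any (fun c => decide ('a' ≤ c ∧ c ≤ 'z'))
  has_upper && !has_lower

-- ===== PRECONDITION & SPEC =====
def Spec_my_isupper (s : String) (out : Bool) : Prop := out = my_isupper_alt s
instance (s : String) (out : Bool) : Decidable (Spec_my_isupper s out) := by unfold Spec_my_isupper; infer_instance

-- ===== CLAIM (what is proved, stated in full; the proofs are below) =====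
def Claim_equal_my_isupper : Prop := ∀ (s : String), Dom_my_isupper s → Spec_my_isupper s (my_isupper s)

-- ===== LEMMAS AND PROOFS =====
theorem myIsupperLoopA_eq (l : List Char) (hu : Bool) :
    myIsupperLoopA l hu =
      ((hu || l.any (fun c => decide ('A' ≤ c ∧ c ≤ 'Z'))) &&
        !(l.any (fun c => decide ('a' ≤ c ∧ c ≤ 'z')))) := by
  induction l generalizing hu with
  | nil => simp [myIsupperLoopA]
  | cons ch rest ih =>
      simp only [myIsupperLoopA, List.any_cons]
      split_ifs with h1 h2
      · simp [h1]
      · simp [ih, h1, h2]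
      · simp [ih, h1, h2]

-- ===== VERDICT (by name: the statement is the Claim_ definition above) =====
theorem my_isupper_spec : Claim_equal_my_isupper := by
  intro s _
  unfold Spec_my_isupper my_isupper my_isupper_alt
  simp [myIsupperLoopA_eq]
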